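-- pv_equiv track=rewrite | github.com/adamova47/Thesis | experiments/reconstruction/RSOM/inverse_mapping.py | split_flat_predictions
-- ===== SOURCE A (Python) =====
-- def split_flat_predictions(flat_predictions, sequences):
--     decoded_sequences = []
--     start = 0
--     for seq in sequences:
--         end = start + len(seq)
--         decoded_sequences.append(flat_predictions[start:end])
--         start = end
--     return decoded_sequences
-- ===== SOURCE B (Python) =====
-- from itertools import islice
--
-- def split_flat_predictions(flat_predictions, sequences):
--     it = iter(flat_predictions)
--     return [list(islice(it, len(seq))) for seq in sequences]
-- ===== Notes on version B (the rewrite author's own statement) =====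
-- stated objective: idiomatic
-- what changed: B consumes a single iterator over the flat list with islice, taking len(seq) items per sequence, so no indices or offsets are ever computed, instead of slicing at a running start offset.
import Mathlib
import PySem

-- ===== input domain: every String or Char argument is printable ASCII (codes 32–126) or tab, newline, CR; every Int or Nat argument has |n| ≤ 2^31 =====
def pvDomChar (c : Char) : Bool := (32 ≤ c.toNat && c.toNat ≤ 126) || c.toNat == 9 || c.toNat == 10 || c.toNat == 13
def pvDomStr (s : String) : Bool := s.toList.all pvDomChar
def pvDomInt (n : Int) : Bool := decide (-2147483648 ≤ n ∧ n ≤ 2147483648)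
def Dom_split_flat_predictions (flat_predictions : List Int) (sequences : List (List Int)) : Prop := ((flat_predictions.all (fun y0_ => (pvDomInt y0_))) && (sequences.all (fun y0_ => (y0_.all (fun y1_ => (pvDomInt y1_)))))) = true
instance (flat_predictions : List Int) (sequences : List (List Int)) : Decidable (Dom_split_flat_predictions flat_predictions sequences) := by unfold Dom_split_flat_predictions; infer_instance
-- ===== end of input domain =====

-- B consumes a single iterator over the flat list (islice takes len(seq) items per sequence), so no offsets are computed; alternative decomposition, same cost.
-- ===== PORT A =====
-- literal port of A: one loop threading a mutable start offset, appending flat_predictions[start:end]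
def split_flat_predictions (flat_predictions : List Int) (sequences : List (List Int)) : List (List Int) :=
  (sequences.foldl (fun (st : List (List Int) × Int) seq =>
      let e : Int := st.2 + (seq.length : Int)
      (st.1 ++ [PySem.List.slice flat_predictions (some st.2) (some e)], e))
    (([] : List (List Int)), (0 : Int))).1

-- ===== PORT B =====
-- it = iter(flat_predictions); for each seq, list(islice(it, len(seq))) takes the next
-- len(seq) items off the iterator (fewer if exhausted) — modelled as take/drop on the remainder
def pvChunks (rem : List Int) : List (List Int) → List (List Int)
  | [] => []
  | s :: rest => rem.take s.length :: pvChunks (rem.drop s.length) rest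

def split_flat_predictions_alt (flat_predictions : List Int) (sequences : List (List Int)) : List (List Int) :=
  pvChunks flat_predictions sequences

-- ===== PRECONDITION & SPEC =====
def Spec_split_flat_predictions (flat_predictions : List Int) (sequences : List (List Int)) (out : List (List Int)) : Prop := out = split_flat_predictions_alt flat_predictions sequences
instance (flat_predictions : List Int) (sequences : List (List Int)) (out : List (List Int)) : Decidable (Spec_split_flat_predictions flat_predictions sequences out) := by unfold Spec_split_flat_predictions; infer_instance

-- ===== CLAIM (what is proved, stated in full; the proofs are below) =====
def Claim_equal_split_flat_predictions : Prop := ∀ (flat_predictions : List Int) (sequences : List (List Int)), Dom_split_flat_predictions flat_predictions sequences → Spec_split_flat_predictions flat_predictions sequences (split_flat_predictions flat_predictions sequences)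

-- ===== LEMMAS AND PROOFS =====

theorem pv_fold_eq (fp : List Int) :
    ∀ (seqs : List (List Int)) (acc : List (List Int)) (n : Nat),
    (seqs.foldl (fun (st : List (List Int) × Int) seq =>
        let e : Int := st.2 + (seq.length : Int)
        (st.1 ++ [PySem.List.slice fp (some st.2) (some e)], e)) (acc, (n : Int))).1
    = acc ++ pvChunks (fp.drop n) seqs := by
  intro seqs
  induction seqs with
  | nil => intro acc n; simp [pvChunks]
  | cons s rest ih =>
    intro acc n
    simp only [List.foldl_cons]
    have hcast : ((n : Int) + (s.length : Int)) = ((n + s.length : Nat) : Int) := by push_cast; ring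
    rw [hcast, ih]
    rw [PySem.List.slice_natCast]
    simp [pvChunks, List.drop_drop, List.append_assoc]

-- ===== VERDICT (by name: the statement is the Claim_ definition above) =====
theorem split_flat_predictions_spec : Claim_equal_split_flat_predictions := by
  intro fp seqs _
  unfold Spec_split_flat_predictions split_flat_predictions split_flat_predictions_alt
  simpa using pv_fold_eq fp seqs [] 0
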